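-- pv_equiv track=rewrite | github.com/HyewonKkang/algorithm | CodingTest/naver-clova-ai-rush/3.py | solution
-- ===== SOURCE A (Python) =====
-- from itertools import combinations
--
-- def solution(prices, d, k):
--     answer = 0
--     prices.sort()
--     length = len(prices)
--
--     if prices[-1] - prices[0] <= d:
--         answer = sum(prices) // len(prices)
--     elif prices[-2] - prices[1] <= d:
--         answer = sum(prices[1:length - 1]) // (len(prices) - 2)
--     else:
--         flag = 0
--         tmp_avg = prices[-1]
--         for comb in list(combinations(prices, k)):
--             if max(comb) - min(comb) <= d:
--                 tmp_avg = min(tmp_avg, sum(comb) // len(comb))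
--                 flag = 1
--         if flag == 0:
--             if length % 2:
--                 answer = prices[length // 2]
--             else:
--                 answer = prices[length // 2 - 1]
--     return answer
-- ===== SOURCE B (Python) =====
-- # B: decides the combinations branch with a single consecutive-window test on the
-- # sorted list instead of enumerating all C(n,k) combinations: a k-subset with
-- # max-min <= d exists iff some k consecutive sorted elements span at most d.
-- # In that branch A's `answer` is never updated (tmp_avg is discarded), so A
-- # returns 0 whenever such a subset exists; B returns the same value directly.
-- # Note: like A, sorts `prices` in place; equivalence is about the return value.
-- def solution(prices, d, k):
--     prices.sort()
--     n = len(prices)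
--     if prices[-1] - prices[0] <= d:
--         return sum(prices) // n
--     if prices[-2] - prices[1] <= d:
--         return sum(prices[1:n - 1]) // (n - 2)
--     if 1 <= k <= n and any(prices[i + k - 1] - prices[i] <= d for i in range(n - k + 1)):
--         return 0
--     return prices[n // 2] if n % 2 else prices[n // 2 - 1]
-- ===== Notes on version B (the rewrite author's own statement) =====
-- stated objective: simpler
-- what changed: B replaces A's enumeration of all C(n,k) combinations (with max/min/sum per combination) by a single existence test over windows of k consecutive elements of the sorted list, which decides the branch exactly: A returns 0 there because its answer variable is never updated from tmp_avg, and B returns that same value directly.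
import Mathlib
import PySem

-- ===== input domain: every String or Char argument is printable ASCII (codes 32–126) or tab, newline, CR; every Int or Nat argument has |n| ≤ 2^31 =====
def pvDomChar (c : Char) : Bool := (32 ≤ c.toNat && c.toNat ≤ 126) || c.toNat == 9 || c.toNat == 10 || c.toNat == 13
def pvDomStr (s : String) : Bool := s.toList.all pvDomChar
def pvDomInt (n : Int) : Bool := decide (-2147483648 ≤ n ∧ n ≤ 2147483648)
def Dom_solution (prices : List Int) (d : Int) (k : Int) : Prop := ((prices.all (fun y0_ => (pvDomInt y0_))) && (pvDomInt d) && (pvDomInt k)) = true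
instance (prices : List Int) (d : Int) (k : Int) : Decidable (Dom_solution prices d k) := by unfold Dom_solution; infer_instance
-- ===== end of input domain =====

-- B decides A's combinations branch with one pass over windows of k consecutive elements of the
-- sorted list instead of enumerating all C(n,k) combinations (a k-subset of value range ≤ d exists
-- iff some such window spans ≤ d); in that branch A's `answer` is never updated from tmp_avg, so it
-- is 0 whenever a valid subset exists, and B returns that same value directly.
-- Both A and B sort `prices` in place (Python side); the equivalence is about the return value.

-- ===== PORT A =====
-- itertools.combinations(l, m) over a list, in itertools' lexicographic-by-index order
def pyCombinations : List Int → Nat → List (List Int)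
  | _, 0 => [[]]
  | [], _+1 => []
  | x :: xs, m+1 => (pyCombinations xs m).map (x :: ·) ++ pyCombinations xs (m+1)

def solution (prices : List Int) (d : Int) (k : Int) : Int :=
  let s := PySem.List.sorted prices (fun x => x) false
  let n : Int := (s.length : Int)
  if (PySem.List.pyGet? s (-1)).getD 0 - (PySem.List.pyGet? s 0).getD 0 ≤ d then
    PySem.Int.floordiv s.sum n
  else if (PySem.List.pyGet? s (-2)).getD 0 - (PySem.List.pyGet? s 1).getD 0 ≤ d then
    PySem.Int.floordiv (PySem.List.slice s (some 1) (some (n - 1))).sum (n - 2)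
  else
    -- tmp_avg = prices[-1]; flag = 0; fold over the combinations list
    let st := (pyCombinations s k.toNat).foldl (fun (p : Int × Int) c =>
      match PySem.List.max? c (fun x => x), PySem.List.min? c (fun x => x) with
      | some mx, some mn =>
          if mx - mn ≤ d then (min p.1 (PySem.Int.floordiv c.sum (c.length : Int)), 1) else p
      | _, _ => p) ((PySem.List.pyGet? s (-1)).getD 0, 0)
    if st.2 = 0 then
      if PySem.Int.mod n 2 ≠ 0 then (PySem.List.pyGet? s (PySem.Int.floordiv n 2)).getD 0
      else (PySem.List.pyGet? s (PySem.Int.floordiv n 2 - 1)).getD 0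
    else 0   -- answer was never updated from tmp_avg, so it is still the initial 0

-- ===== PORT B =====
def solution_alt (prices : List Int) (d : Int) (k : Int) : Int :=
  let s := PySem.List.sorted prices (fun x => x) false
  let n : Int := (s.length : Int)
  if (PySem.List.pyGet? s (-1)).getD 0 - (PySem.List.pyGet? s 0).getD 0 ≤ d then
    PySem.Int.floordiv s.sum n
  else if (PySem.List.pyGet? s (-2)).getD 0 - (PySem.List.pyGet? s 1).getD 0 ≤ d then
    PySem.Int.floordiv (PySem.List.slice s (some 1) (some (n - 1))).sum (n - 2)
  else if 1 ≤ k ∧ k ≤ n ∧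
      ((PySem.List.pyRange 0 (n - k + 1) 1).any (fun i =>
        decide ((PySem.List.pyGet? s (i + k - 1)).getD 0 - (PySem.List.pyGet? s i).getD 0 ≤ d))) = true then
    0
  else
    if PySem.Int.mod n 2 ≠ 0 then (PySem.List.pyGet? s (PySem.Int.floordiv n 2)).getD 0
    else (PySem.List.pyGet? s (PySem.Int.floordiv n 2 - 1)).getD 0

-- ===== PRECONDITION & SPEC =====
-- Pre_ excludes exactly the inputs where A raises: the empty list (IndexError), a singleton with
-- d < 0 (IndexError on prices[-2]), a pair that reaches the middle-trim branch (ZeroDivisionError,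
-- division by len-2 = 0), and the combinations branch with k ≤ 0 (ValueError).
def Pre_solution (prices : List Int) (d : Int) (k : Int) : Prop :=
  let s := PySem.List.sorted prices (fun x => x) false
  let n := s.length
  prices ≠ [] ∧
  (n = 1 → 0 ≤ d) ∧
  (n = 2 → ¬ (¬ (s.getD (n-1) 0 - s.getD 0 0 ≤ d) ∧ s.getD (n-2) 0 - s.getD 1 0 ≤ d)) ∧
  ((2 ≤ n ∧ ¬ (s.getD (n-1) 0 - s.getD 0 0 ≤ d) ∧ ¬ (s.getD (n-2) 0 - s.getD 1 0 ≤ d)) → 1 ≤ k)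
instance (prices : List Int) (d : Int) (k : Int) : Decidable (Pre_solution prices d k) := by
  unfold Pre_solution; infer_instance
def pvWitness_solution : List Int × Int × Int := ([1, 2, 30, 40], 5, 2)

def Spec_solution (prices : List Int) (d : Int) (k : Int) (out : Int) : Prop :=
  out = solution_alt prices d k
instance (prices : List Int) (d : Int) (k : Int) (out : Int) : Decidable (Spec_solution prices d k out) := by
  unfold Spec_solution; infer_instance

-- ===== CLAIM (what is proved, stated in full; the proofs are below) =====
def Claim_equal_solution : Prop := ∀ (prices : List Int) (d : Int) (k : Int), Dom_solution prices d k → Pre_solution prices d k → Spec_solution prices d k (solution prices d k)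

-- ===== LEMMAS AND PROOFS =====

-- every member of pyCombinations l m is a length-m sublist of l
lemma mem_pyCombinations {l c : List Int} {m : Nat} (h : c ∈ pyCombinations l m) :
    c.Sublist l ∧ c.length = m := by
  induction l generalizing c m with
  | nil =>
    cases m with
    | zero => simp [pyCombinations] at h; simp [h]
    | succ m => simp [pyCombinations] at h
  | cons x xs ih =>
    cases m with
    | zero => simp [pyCombinations] at h; simp [h]
    | succ m =>
      simp only [pyCombinations, List.mem_append, List.mem_map] at h
      rcases h with ⟨c', hc', rfl⟩ | h
      · obtain ⟨hs, hl⟩ := ih hc'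
        exact ⟨List.Sublist.cons₂ x hs, by simp [hl]⟩
      · obtain ⟨hs, hl⟩ := ih h
        exact ⟨hs.cons x, hl⟩

-- and conversely every length-m sublist occurs among the combinations
lemma sublist_mem_pyCombinations : ∀ {l c : List Int}, c.Sublist l → c ∈ pyCombinations l c.length := by
  intro l
  induction l with
  | nil => intro c h; rw [List.sublist_nil] at h; subst h; simp [pyCombinations]
  | cons x xs ih =>
    intro c h
    rcases List.sublist_cons_iff.mp h with h | ⟨r, rfl, hr⟩
    · cases c with
      | nil => simp [pyCombinations]
      | cons y c' =>
        simp only [List.length_cons, pyCombinations, List.mem_append]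
        exact Or.inr (ih h)
    · simp only [List.length_cons, pyCombinations, List.mem_append, List.mem_map]
      exact Or.inl ⟨r, ih hr, rfl⟩

-- no combinations at all when m exceeds the length
lemma pyCombinations_eq_nil {l : List Int} {m : Nat} (h : l.length < m) :
    pyCombinations l m = [] := by
  induction l generalizing m with
  | nil => cases m with
    | zero => omega
    | succ m => rfl
  | cons x xs ih =>
    cases m with
    | zero => simp at h
    | succ m =>
      simp only [pyCombinations]
      rw [ih (by simpa using h), ih (by simp at h; omega)]
      rfl

-- a nonempty sublist of a sorted list sits above a window of consecutive elements
lemma window_of_sublist : ∀ {c s : List Int}, c.Sublist s → c ≠ [] →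
    List.Pairwise (· ≤ ·) s →
    ∃ i, i + c.length ≤ s.length ∧ s.getD i 0 = c.getD 0 0 ∧
      s.getD (i + c.length - 1) 0 ≤ c.getD (c.length - 1) 0 := by
  intro c s h
  induction h with
  | slnil => intro h; exact absurd rfl h
  | @cons c' s' y hsub ih =>
    intro hc hp
    obtain ⟨i, h1, h2, h3⟩ := ih hc hp.of_cons
    refine ⟨i + 1, by simp; omega, by simpa using h2, ?_⟩
    have hl : c'.length ≠ 0 := by simpa using hc
    have e : i + 1 + c'.length - 1 = (i + c'.length - 1) + 1 := by omega
    rw [e]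
    simpa using h3
  | @cons₂ c' s' x hsub ih =>
    intro _ hp
    rcases eq_or_ne c' [] with rfl | hne
    · exact ⟨0, by simp, by simp, by simp⟩
    · obtain ⟨i, h1, h2, h3⟩ := ih hne hp.of_cons
      have hl : c'.length ≠ 0 := by simpa using hne
      refine ⟨0, by simp; omega, by simp, ?_⟩
      have e1 : (x :: s').getD (0 + (x :: c').length - 1) 0 = s'.getD (c'.length - 1) 0 := by
        have e : 0 + (x :: c').length - 1 = (c'.length - 1) + 1 := by simp; omega
        rw [e]; simp
      have e2 : (x :: c').getD ((x :: c').length - 1) 0 = c'.getD (c'.length - 1) 0 := by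
        have e : (x :: c').length - 1 = (c'.length - 1) + 1 := by simp; omega
        rw [e]; simp
      rw [e1, e2]
      refine le_trans ?_ h3
      have hmono := List.pairwise_iff_getElem.mp hp.of_cons
      rcases Nat.lt_or_ge (c'.length - 1) (i + c'.length - 1) with hlt | hge
      · have hb : i + c'.length - 1 < s'.length := by omega
        rw [List.getD_eq_getElem?_getD, List.getD_eq_getElem?_getD,
          List.getElem?_eq_getElem (by omega), List.getElem?_eq_getElem hb]
        simpa using hmono _ _ (by omega) hb hlt
      · have e : c'.length - 1 = i + c'.length - 1 := by omega
        rw [e]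

-- every element of the window s[i : i+m] lies between the window's two endpoints
lemma window_bounds {s : List Int} (hp : List.Pairwise (· ≤ ·) s) {i m : Nat}
    (hm : 1 ≤ m) (hle : i + m ≤ s.length) :
    ∀ x ∈ (s.drop i).take m, s.getD i 0 ≤ x ∧ x ≤ s.getD (i + m - 1) 0 := by
  intro x hx
  rw [List.mem_iff_getElem] at hx
  obtain ⟨j, hj, rfl⟩ := hx
  have hlen : ((s.drop i).take m).length = min m (s.length - i) := by simp
  have hjm : j < m := by omega
  have hjl : i + j < s.length := by omega
  have he : ((s.drop i).take m)[j] = s[i + j]'hjl := by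
    rw [List.getElem_take, List.getElem_drop]
  have hmono := List.pairwise_iff_getElem.mp hp
  constructor
  · rw [he, List.getD_eq_getElem?_getD, List.getElem?_eq_getElem (by omega), Option.getD_some]
    rcases Nat.eq_or_lt_of_le (Nat.zero_le j) with hj0 | hj0
    · simp [← hj0]
    · exact hmono i (i + j) (by omega) hjl (by omega)
  · rw [he, List.getD_eq_getElem?_getD, List.getElem?_eq_getElem (by omega), Option.getD_some]
    rcases Nat.eq_or_lt_of_le (Nat.succ_le_of_lt hjm) with hj1 | hj1
    · have e : i + j = i + m - 1 := by omega
      simp [e]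
    · exact hmono (i + j) (i + m - 1) hjl (by omega) (by omega)

-- a fold whose step fixes every list element is the identity
lemma foldl_fixed_of_mem {α β : Type} {L : List β} {f : α → β → α}
    (h : ∀ p c, c ∈ L → f p c = p) : ∀ init, L.foldl f init = init := by
  induction L with
  | nil => intro init; rfl
  | cons x xs ih =>
    intro init
    rw [List.foldl_cons, h init x (by simp)]
    exact ih (fun p c hc => h p c (by simp [hc])) init

-- a flag that, once set, is preserved by every step stays set through the fold
lemma foldl_snd_one_persist {α β : Type} {f : α × Int → β → α × Int}
    (hper : ∀ p c, p.2 = 1 → (f p c).2 = 1) :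
    ∀ (L : List β) (st : α × Int), st.2 = 1 → (L.foldl f st).2 = 1 := by
  intro L
  induction L with
  | nil => intro st h; exact h
  | cons x xs ih =>
    intro st h
    rw [List.foldl_cons]
    exact ih _ (hper st x h)

-- if some list element sets the flag and every step preserves a set flag, the fold ends with it set
lemma foldl_snd_one_of_mem {α β : Type} {f : α × Int → β → α × Int}
    (hper : ∀ p c, p.2 = 1 → (f p c).2 = 1) {L : List β} {c0 : β} (hmem : c0 ∈ L)
    (hset : ∀ p, (f p c0).2 = 1) (st : α × Int) : (L.foldl f st).2 = 1 := by
  obtain ⟨l1, l2, rfl⟩ := List.append_of_mem hmem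
  rw [List.foldl_append, List.foldl_cons]
  exact foldl_snd_one_persist hper _ _ (hset _)

-- the two value bridges used on the combinations branch
lemma pyGetD_last (s : List Int) :
    (PySem.List.pyGet? s (-1)).getD 0 = s.getD (s.length - 1) 0 := by
  rw [PySem.List.pyGet?_neg_one, List.getLast?_eq_getElem?, ← List.getD_eq_getElem?_getD]

lemma pyGetD_nonneg (s : List Int) {i : Int} (hi : 0 ≤ i) :
    (PySem.List.pyGet? s i).getD 0 = s.getD i.toNat 0 := by
  rw [PySem.List.pyGet?_of_nonneg s hi, ← List.getD_eq_getElem?_getD]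

-- ===== VERDICT (by name: the statement is the Claim_ definition above) =====
theorem solution_spec : Claim_equal_solution := by
  intro prices d k _ hpre
  unfold Spec_solution
  unfold Pre_solution at hpre
  simp only [] at hpre
  unfold solution solution_alt
  simp only []
  set s := PySem.List.sorted prices (fun x => x) false with hs
  obtain ⟨hne, hd1, hn2, hk1⟩ := hpre
  have hsne : s ≠ [] := fun h => hne ((PySem.List.sorted_eq_nil_iff prices (fun x => x) false).mp h)
  have hn1 : 1 ≤ s.length := List.length_pos_iff.mpr hsne
  have hp : List.Pairwise (· ≤ ·) s := PySem.List.sorted_pairwise prices (fun x => x)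
  have val1 : (PySem.List.pyGet? s (-1)).getD 0 = s.getD (s.length - 1) 0 := pyGetD_last s
  have val0 : (PySem.List.pyGet? s 0).getD 0 = s.getD 0 0 := by
    simpa using pyGetD_nonneg s (le_refl 0)
  by_cases hb1 : (PySem.List.pyGet? s (-1)).getD 0 - (PySem.List.pyGet? s 0).getD 0 ≤ d
  · simp only [if_pos hb1]
  · simp only [if_neg hb1]
    by_cases hb2 : (PySem.List.pyGet? s (-2)).getD 0 - (PySem.List.pyGet? s 1).getD 0 ≤ d
    · simp only [if_pos hb2]
    · simp only [if_neg hb2]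
      -- combinations branch
      rw [val1, val0] at hb1
      have h2n : 2 ≤ s.length := by
        by_contra h
        have he : s.length = 1 := by omega
        have := hd1 he
        rw [he] at hb1
        simp at hb1
        omega
      have val2 : (PySem.List.pyGet? s (-2)).getD 0 = s.getD (s.length - 2) 0 := by
        rw [PySem.List.pyGet?_neg_ofNat s 2 (by norm_num) h2n, ← List.getD_eq_getElem?_getD]
      have val1' : (PySem.List.pyGet? s 1).getD 0 = s.getD 1 0 := by
        simpa using pyGetD_nonneg s (by norm_num : (0:Int) ≤ 1)
      rw [val2, val1'] at hb2
      have hk : 1 ≤ k := hk1 ⟨h2n, hb1, hb2⟩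
      -- every step of A's fold preserves a set flag
      have hper : ∀ (p : Int × Int) (c : List Int), p.2 = 1 →
          ((match PySem.List.max? c (fun x => x), PySem.List.min? c (fun x => x) with
            | some mx, some mn =>
                if mx - mn ≤ d then (min p.1 (PySem.Int.floordiv c.sum (c.length : Int)), 1) else p
            | _, _ => p) : Int × Int).2 = 1 := by
        intro p c hp2
        rcases e1 : PySem.List.max? c (fun x => x : Int → Int) with _ | mx <;>
          rcases e2 : PySem.List.min? c (fun x => x : Int → Int) with _ | mn <;>
          simp [hp2]
        split_ifs <;> simp [hp2]
      by_cases hkn : k ≤ (s.length : Int)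
      · by_cases hex : ∃ i ∈ List.range (s.length + 1 - k.toNat),
            s.getD (i + k.toNat - 1) 0 - s.getD i 0 ≤ d
        · -- a valid window exists: A's flag ends 1 and B's test succeeds; both return 0
          obtain ⟨i, hi, hile⟩ := hex
          rw [List.mem_range] at hi
          have hkt : 1 ≤ k.toNat := by omega
          have hwle : i + k.toNat ≤ s.length := by omega
          -- the window itself is one of the combinations
          set c0 : List Int := (s.drop i).take k.toNat with hc0
          have hc0sub : c0.Sublist s :=
            ((List.take_prefix _ _).sublist).trans (List.drop_sublist _ _)
          have hc0len : c0.length = k.toNat := by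
            rw [hc0, List.length_take, List.length_drop]; omega
          have hc0mem : c0 ∈ pyCombinations s k.toNat := by
            have := sublist_mem_pyCombinations hc0sub
            rwa [hc0len] at this
          have hc0ne : c0 ≠ [] := by
            intro h; rw [h] at hc0len; simp at hc0len; omega
          have hbnd := window_bounds hp hkt hwle
          have hset : ∀ p : Int × Int,
              ((match PySem.List.max? c0 (fun x => x), PySem.List.min? c0 (fun x => x) with
                | some mx, some mn =>
                    if mx - mn ≤ d then (min p.1 (PySem.Int.floordiv c0.sum (c0.length : Int)), 1) else p
                | _, _ => p) : Int × Int).2 = 1 := by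
            intro p
            obtain ⟨mx, hmx⟩ := Option.ne_none_iff_exists'.mp
              (fun h => hc0ne ((PySem.List.max?_eq_none_iff c0 (fun x => x : Int → Int)).mp h))
            obtain ⟨mn, hmn⟩ := Option.ne_none_iff_exists'.mp
              (fun h => hc0ne ((PySem.List.min?_eq_none_iff c0 (fun x => x : Int → Int)).mp h))
            have b1 := (hbnd mx (PySem.List.max?_mem hmx)).2
            have b2 := (hbnd mn (PySem.List.min?_mem hmn)).1
            rw [hmx, hmn]
            have : mx - mn ≤ d := by omega
            simp [this]
          have hflag := foldl_snd_one_of_mem hper hc0mem hset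
            ((PySem.List.pyGet? s (-1)).getD 0, (0 : Int))
          rw [hflag]
          rw [if_neg (by norm_num)]
          have hany : ((PySem.List.pyRange 0 ((s.length : Int) - k + 1) 1).any (fun j =>
              decide ((PySem.List.pyGet? s (j + k - 1)).getD 0 - (PySem.List.pyGet? s j).getD 0 ≤ d))) = true := by
            rw [List.any_eq_true]
            refine ⟨(i : Int), ?_, ?_⟩
            · rw [PySem.List.mem_pyRange_one]; omega
            · rw [pyGetD_nonneg s (by omega : (0:Int) ≤ (i:Int) + k - 1),
                pyGetD_nonneg s (by omega : (0:Int) ≤ (i:Int))]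
              have e : ((i : Int) + k - 1).toNat = i + k.toNat - 1 := by omega
              rw [e]
              simpa using hile
          rw [if_pos (⟨hk, hkn, hany⟩ : (1:Int) ≤ k ∧ k ≤ ((s.length : Int)) ∧ _)]
        · -- no valid window: A's fold is the identity (no valid combination) and B's test fails
          have hw : ∀ i ∈ List.range (s.length + 1 - k.toNat),
              ¬ (s.getD (i + k.toNat - 1) 0 - s.getD i 0 ≤ d) := by
            intro i hi hle
            exact hex ⟨i, hi, hle⟩
          have hfoldA : ∀ (p : Int × Int) c, c ∈ pyCombinations s k.toNat →
              (match PySem.List.max? c (fun x => x), PySem.List.min? c (fun x => x) with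
               | some mx, some mn =>
                   if mx - mn ≤ d then (min p.1 (PySem.Int.floordiv c.sum (c.length : Int)), 1) else p
               | _, _ => p) = p := by
            intro p c hc
            obtain ⟨hsub, hlen⟩ := mem_pyCombinations hc
            have hcne : c ≠ [] := by
              intro h; rw [h] at hlen; simp at hlen; omega
            obtain ⟨mx, hmx⟩ := Option.ne_none_iff_exists'.mp
              (fun h => hcne ((PySem.List.max?_eq_none_iff c (fun x => x : Int → Int)).mp h))
            obtain ⟨mn, hmn⟩ := Option.ne_none_iff_exists'.mp
              (fun h => hcne ((PySem.List.min?_eq_none_iff c (fun x => x : Int → Int)).mp h))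
            obtain ⟨i, hi1, hi2, hi3⟩ := window_of_sublist hsub hcne hp
            have hkt : 1 ≤ k.toNat := by omega
            rw [hlen] at hi1 hi3
            have hwin := hw i (by rw [List.mem_range]; omega)
            have hm0 : c.getD 0 0 ∈ c := by
              rw [List.getD_eq_getElem?_getD, List.getElem?_eq_getElem (by omega)]
              exact List.getElem_mem _
            have hm1 : c.getD (c.length - 1) 0 ∈ c := by
              rw [List.getD_eq_getElem?_getD, List.getElem?_eq_getElem (by omega)]
              exact List.getElem_mem _
            rw [hlen] at hm1
            have b1 := PySem.List.min?_isMin hmn _ hm0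
            have b2 := PySem.List.max?_isMax hmx _ hm1
            simp only at b1 b2
            rw [hmx, hmn]
            have hno : ¬ (mx - mn ≤ d) := by omega
            simp [hno]
          rw [foldl_fixed_of_mem hfoldA]
          have hany : ((PySem.List.pyRange 0 ((s.length : Int) - k + 1) 1).any (fun j =>
              decide ((PySem.List.pyGet? s (j + k - 1)).getD 0 - (PySem.List.pyGet? s j).getD 0 ≤ d))) = false := by
            rw [List.any_eq_false]
            intro j hj
            rw [PySem.List.mem_pyRange_one] at hj
            simp only [decide_eq_true_eq]
            rw [pyGetD_nonneg s (by omega : (0:Int) ≤ j + k - 1),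
              pyGetD_nonneg s (by omega : (0:Int) ≤ j)]
            have e : (j + k - 1).toNat = j.toNat + k.toNat - 1 := by omega
            rw [e]
            exact hw j.toNat (by rw [List.mem_range]; omega)
          rw [if_neg (fun h : (1:Int) ≤ k ∧ k ≤ ((s.length : Int)) ∧ _ => by
            rw [hany] at h; exact Bool.false_ne_true h.2.2)]
          rfl
      · -- k exceeds the length: no combinations on the A side, B's test is guarded away
        rw [pyCombinations_eq_nil (by omega : s.length < k.toNat), List.foldl_nil]
        rw [if_neg (fun h : (1:Int) ≤ k ∧ k ≤ ((s.length : Int)) ∧ _ => hkn h.2.1)]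
        rfl
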